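-- pv_equiv track=rewrite | github.com/HueWuHue/MIT-ocw-6.0001 | ps2/hangman.py | match_with_gaps
-- ===== SOURCE A (Python) =====
-- def match_with_gaps(my_word, other_word):
--     '''
--     my_word: string with _ characters, current guess of secret word
--     other_word: string, regular English word
--     returns: boolean, True if all the actual letters of my_word match the
--         corresponding letters of other_word, or the letter is the special symbol
--         _ , and my_word and other_word are of the same length;
--         False otherwise:
--     '''
--     # Initializing variables
--     letter_list = []
--     error = 0
--     match = 0
--     requirement = 0
--     # Removing the space in-between "_"
--     guessed_word = my_word.replace(" ", "")
--     for char in guessed_word: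
--         if char not in letter_list and char.isalpha():
--             letter_list.append(char)
--     # Check for length
--     if len(other_word) == len(guessed_word):
--         for i in range(len(guessed_word)):
--             # Making sure every letter match
--             if guessed_word[i].isalpha():
--                 requirement += 1
--                 if guessed_word[i] == other_word[i]:
--                     match += 1
--             else:
--                 if other_word[i] in letter_list:
--                     error += 1
--     if error == 0 and match == requirement and requirement > 0:
--         return True
--     else:
--         return False
-- ===== SOURCE B (Python) =====
-- def match_with_gaps(my_word, other_word):
--     stripped = my_word.replace(" ", "")
--     if len(stripped) != len(other_word):
--         return False
--     guessed = {c for c in stripped if c.isalpha()}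
--     if not guessed:
--         return False
--     def positions(word, c):
--         return [i for i, x in enumerate(word) if x == c]
--     return all(positions(stripped, c) == positions(other_word, c) for c in guessed)
-- ===== Notes on version B (the rewrite author's own statement) =====
-- stated objective: alternative
-- what changed: Instead of A's single indexed pass with three running counters (match/requirement/error) and a hand-deduplicated letter list, B checks the pattern per LETTER: after an early length/no-letter exit it compares, for each distinct guessed letter, the list of index positions of that letter in the stripped guess with its positions in the candidate word; the pattern matches iff every guessed letter occupies exactly the same positions in both words.
import Mathlib
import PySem

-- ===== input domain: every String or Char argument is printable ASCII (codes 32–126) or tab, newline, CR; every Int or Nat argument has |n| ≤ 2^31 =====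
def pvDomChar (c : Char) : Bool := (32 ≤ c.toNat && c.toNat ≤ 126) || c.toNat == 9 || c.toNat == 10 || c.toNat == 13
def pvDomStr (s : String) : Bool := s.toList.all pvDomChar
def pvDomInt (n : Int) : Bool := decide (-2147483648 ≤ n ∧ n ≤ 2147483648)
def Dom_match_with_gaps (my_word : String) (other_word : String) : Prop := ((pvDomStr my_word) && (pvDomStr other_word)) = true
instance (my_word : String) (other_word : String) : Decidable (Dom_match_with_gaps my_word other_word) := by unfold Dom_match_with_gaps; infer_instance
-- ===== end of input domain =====

-- B replaces A's indexed pass with three counters by a per-letter check: each distinct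
-- guessed letter must occupy exactly the same index positions in both words ('alternative').

-- ===== PORT A =====
def match_with_gaps (my_word : String) (other_word : String) : Bool :=
  -- letter_list loop: 'if char not in letter_list and char.isalpha(): letter_list.append(char)'
  let guessed_word := PySem.Chars.replace my_word.toList [' '] []
  let ow := other_word.toList
  let letter_list : List Char := guessed_word.foldl
    (fun acc char => if !acc.contains char && PySem.Chars.isalpha char then acc ++ [char] else acc) []
  -- the index loop keeps the three counters (error, match, requirement) as one triple state
  let s : Int × Int × Int :=
    if ow.length = guessed_word.length then
      (PySem.List.pyRange 0 (guessed_word.length : Int) 1).foldl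
        (fun (s : Int × Int × Int) i =>
          if PySem.Chars.isalpha (PySem.List.pyGetD guessed_word i ' ') then
            (if PySem.List.pyGetD guessed_word i ' ' == PySem.List.pyGetD ow i ' ' then
              (s.1, s.2.1 + 1, s.2.2 + 1)
             else (s.1, s.2.1, s.2.2 + 1))
          else
            (if letter_list.contains (PySem.List.pyGetD ow i ' ') then
              (s.1 + 1, s.2.1, s.2.2)
             else (s.1, s.2.1, s.2.2)))
        (0, 0, 0)
    else (0, 0, 0)
  if s.1 == 0 && s.2.1 == s.2.2 && decide (s.2.2 > 0) then true else false

-- ===== PORT B =====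
-- positions(word, c) = [i for i, x in enumerate(word) if x == c]
def pvPositions (word : List Char) (c : Char) : List Int :=
  ((PySem.List.enumerate word 0).filter (fun p => p.2 == c)).map (fun p => p.1)

def match_with_gaps_alt (my_word : String) (other_word : String) : Bool :=
  let stripped := PySem.Chars.replace my_word.toList [' '] []
  if stripped.length != other_word.toList.length then false
  else
    let guessed : PySem.Set Char := PySem.Set.ofList (stripped.filter PySem.Chars.isalpha)
    if guessed.isEmpty then false
    else guessed.all (fun c => pvPositions stripped c == pvPositions other_word.toList c)

-- ===== PRECONDITION & SPEC =====
def Spec_match_with_gaps (my_word : String) (other_word : String) (out : Bool) : Prop := out = match_with_gaps_alt my_word other_word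
instance (my_word : String) (other_word : String) (out : Bool) : Decidable (Spec_match_with_gaps my_word other_word out) := by unfold Spec_match_with_gaps; infer_instance

-- ===== CLAIM (what is proved, stated in full; the proofs are below) =====
def Claim_equal_match_with_gaps : Prop := ∀ (my_word : String) (other_word : String), Dom_match_with_gaps my_word other_word → Spec_match_with_gaps my_word other_word (match_with_gaps my_word other_word)

-- ===== LEMMAS AND PROOFS =====

-- A's dedup-append loop builds exactly set(filter(isalpha, g)).
lemma letterfold_eq_set (g : List Char) :
    g.foldl (fun acc char => if !acc.contains char && PySem.Chars.isalpha char then acc ++ [char] else acc) []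
      = PySem.Set.ofList (g.filter PySem.Chars.isalpha) := by
  have hstep : (fun (acc : List Char) char => if !acc.contains char && PySem.Chars.isalpha char then acc ++ [char] else acc)
      = fun (acc : List Char) char => if PySem.Chars.isalpha char then PySem.Set.add acc char else acc := by
    funext acc c
    by_cases h1 : PySem.Chars.isalpha c <;> by_cases h2 : acc.contains c <;>
      simp [PySem.Set.add, h1]
  rw [hstep, PySem.List.foldl_if_eq_foldl_filter, ← PySem.Set.ofList_eq_foldl]

-- an index loop over two equal-length lists is a fold over their zip
lemma foldl_range_two {σ : Type} (g o : List Char) (d : Char) (f : σ → Char × Char → σ) (init : σ)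
    (h : o.length = g.length) :
    (PySem.List.pyRange 0 (g.length : Int) 1).foldl
      (fun s i => f s (PySem.List.pyGetD g i d, PySem.List.pyGetD o i d)) init
      = (g.zip o).foldl f init := by
  suffices h' : ∀ n, n ≤ g.length →
      (PySem.List.pyRange 0 (n : Int) 1).foldl
        (fun s i => f s (PySem.List.pyGetD g i d, PySem.List.pyGetD o i d)) init
        = ((g.zip o).take n).foldl f init by
    have := h' g.length le_rfl
    rwa [List.take_of_length_le (by simp [h])] at this
  intro n hn
  induction n with
  | zero => simp [PySem.List.pyRange_one_eq_nil]
  | succ k ih =>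
    have hkg : k < g.length := by omega
    have hko : k < o.length := by omega
    have hcast : ((k + 1 : Nat) : Int) = (k : Int) + 1 := by push_cast; ring
    rw [hcast, PySem.List.pyRange_one_succ_right (by positivity), List.foldl_append,
      ih (by omega), List.take_add_one]
    have hz : k < (g.zip o).length := by simp [hkg, hko]
    simp [List.getElem?_eq_getElem hz, List.getElem_zip, PySem.List.pyGetD_natCast,
      List.getElem?_eq_getElem hkg, List.getElem?_eq_getElem hko]

-- count of a conjunction equals count of the outer test iff the inner test holds whenever the outer does
lemma countP_and_eq_iff {α : Type} (l : List α) (p r : α → Bool) :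
    l.countP (fun x => p x && r x) = l.countP p ↔ ∀ x ∈ l, p x → r x := by
  induction l with
  | nil => simp
  | cons a l ih =>
    have hle : l.countP (fun x => p x && r x) ≤ l.countP p :=
      List.countP_mono_left (by intro x _ hx; exact (Bool.and_elim_left hx))
    by_cases hp : p a <;> by_cases hr : r a <;>
      simp [hp, hr] <;> omega

-- the counter loop computes three independent counts over the zip
lemma counters_eq (g o : List Char) (L : List Char) (h : o.length = g.length) :
    (PySem.List.pyRange 0 (g.length : Int) 1).foldl
      (fun (s : Int × Int × Int) i =>
        if PySem.Chars.isalpha (PySem.List.pyGetD g i ' ') then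
          (if PySem.List.pyGetD g i ' ' == PySem.List.pyGetD o i ' ' then
            (s.1, s.2.1 + 1, s.2.2 + 1)
           else (s.1, s.2.1, s.2.2 + 1))
        else
          (if L.contains (PySem.List.pyGetD o i ' ') then
            (s.1 + 1, s.2.1, s.2.2)
           else (s.1, s.2.1, s.2.2)))
      (0, 0, 0)
    = (((g.zip o).countP (fun p => !PySem.Chars.isalpha p.1 && L.contains p.2) : Int),
       ((g.zip o).countP (fun p => PySem.Chars.isalpha p.1 && (p.1 == p.2)) : Int),
       ((g.zip o).countP (fun p => PySem.Chars.isalpha p.1) : Int)) := by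
  refine (foldl_range_two g o ' '
      (fun (s : Int × Int × Int) p =>
        if PySem.Chars.isalpha p.1 then
          (if p.1 == p.2 then (s.1, s.2.1 + 1, s.2.2 + 1) else (s.1, s.2.1, s.2.2 + 1))
        else
          (if L.contains p.2 then (s.1 + 1, s.2.1, s.2.2) else (s.1, s.2.1, s.2.2)))
      (0, 0, 0) h).symm ▸ ?_
  have hsplit : (fun (s : Int × Int × Int) (p : Char × Char) =>
        if PySem.Chars.isalpha p.1 then
          (if p.1 == p.2 then (s.1, s.2.1 + 1, s.2.2 + 1) else (s.1, s.2.1, s.2.2 + 1))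
        else
          (if L.contains p.2 then (s.1 + 1, s.2.1, s.2.2) else (s.1, s.2.1, s.2.2)))
      = fun (s : Int × Int × Int) p =>
          ((fun (e : Int) (p : Char × Char) => if !PySem.Chars.isalpha p.1 && L.contains p.2 then e + 1 else e) s.1 p,
           (fun (t : Int × Int) (p : Char × Char) =>
              ((fun (m : Int) (p : Char × Char) => if PySem.Chars.isalpha p.1 && (p.1 == p.2) then m + 1 else m) t.1 p,
               (fun (r : Int) (p : Char × Char) => if PySem.Chars.isalpha p.1 then r + 1 else r) t.2 p)) s.2 p) := by
    funext s p
    by_cases ha : PySem.Chars.isalpha p.1 <;> by_cases hb : (p.1 == p.2 : Bool) <;>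
      by_cases hc : L.contains p.2 <;> simp [ha, hb] <;> (try (split <;> simp_all))
  rw [hsplit,
    PySem.List.foldl_prod_mk
      (f := fun (e : Int) (p : Char × Char) => if !PySem.Chars.isalpha p.1 && L.contains p.2 then e + 1 else e)
      (g := fun (t : Int × Int) (p : Char × Char) =>
        ((fun (m : Int) (p : Char × Char) => if PySem.Chars.isalpha p.1 && (p.1 == p.2) then m + 1 else m) t.1 p,
         (fun (r : Int) (p : Char × Char) => if PySem.Chars.isalpha p.1 then r + 1 else r) t.2 p)),
    PySem.List.foldl_prod_mk
      (f := fun (m : Int) (p : Char × Char) => if PySem.Chars.isalpha p.1 && (p.1 == p.2) then m + 1 else m)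
      (g := fun (r : Int) (p : Char × Char) => if PySem.Chars.isalpha p.1 then r + 1 else r),
    PySem.List.foldl_if_add_one, PySem.List.foldl_if_add_one, PySem.List.foldl_if_add_one]
  simp

-- every recorded position is at least the enumeration start
lemma mem_positions_ge (w : List Char) (t i : Int) (q : Int × Char → Bool)
    (h : i ∈ ((PySem.List.enumerate w t).filter q).map (fun p => p.1)) : t ≤ i := by
  rcases List.mem_map.mp h with ⟨p, hp, rfl⟩
  rcases (PySem.List.mem_enumerate_iff _ _ _).mp (List.mem_of_mem_filter hp) with ⟨k, hk, rfl⟩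
  simp

-- equal-length position lists of c (counted from any start s) coincide iff c-ness agrees at every zipped pair
lemma positions_from_eq_iff (c : Char) (g : List Char) : ∀ (o : List Char) (s : Int), g.length = o.length →
    ((((PySem.List.enumerate g s).filter (fun p => p.2 == c)).map (fun p => p.1)
        = ((PySem.List.enumerate o s).filter (fun p => p.2 == c)).map (fun p => p.1))
      ↔ ∀ p ∈ g.zip o, (p.1 = c ↔ p.2 = c)) := by
  induction g with
  | nil =>
    intro o s h
    cases o with
    | nil => simp
    | cons b o' => simp at h
  | cons a g' ih =>
    intro o s h
    cases o with
    | nil => simp at h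
    | cons b o' =>
      have h' : g'.length = o'.length := by simpa using h
      rw [PySem.List.enumerate_cons, PySem.List.enumerate_cons]
      by_cases ha : a = c <;> by_cases hb : b = c
      · subst ha; subst hb
        simp only [List.filter_cons, beq_self_eq_true, if_pos, List.map_cons, List.zip_cons_cons,
          List.mem_cons, List.cons.injEq, true_and]
        constructor
        · intro hEq p hp
          rcases hp with rfl | hp
          · simp
          · exact (ih o' (s+1) h').mp hEq p hp
        · intro H
          exact (ih o' (s+1) h').mpr (fun p hp => H p (Or.inr hp))
      · constructor
        · intro hEq
          exfalso
          have hs : s ∈ ((PySem.List.enumerate o' (s+1)).filter (fun p => p.2 == c)).map (fun p => p.1) := by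
            have : s ∈ ((((s, a) :: PySem.List.enumerate g' (s+1))).filter (fun p => p.2 == c)).map (fun p => p.1) := by
              simp [ha]
            rw [hEq] at this
            simpa [List.filter_cons, hb] using this
          have := mem_positions_ge o' (s+1) s _ hs
          omega
        · intro H
          exfalso
          exact hb (((H (a, b)) (by simp)).mp ha)
      · constructor
        · intro hEq
          exfalso
          have hs : s ∈ ((PySem.List.enumerate g' (s+1)).filter (fun p => p.2 == c)).map (fun p => p.1) := by
            have : s ∈ ((((s, b) :: PySem.List.enumerate o' (s+1))).filter (fun p => p.2 == c)).map (fun p => p.1) := by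
              simp [hb]
            rw [← hEq] at this
            simpa [List.filter_cons, ha] using this
          have := mem_positions_ge g' (s+1) s _ hs
          omega
        · intro H
          exfalso
          exact ha (((H (a, b)) (by simp)).mpr hb)
      · simp only [List.filter_cons, show (a == c) = false by simpa using ha,
          show (b == c) = false by simpa using hb, Bool.false_eq_true, if_false,
          List.zip_cons_cons, List.mem_cons]
        rw [ih o' (s+1) h']
        constructor
        · intro H p hp
          rcases hp with rfl | hp
          · simp [ha, hb]
          · exact H p hp
        · intro H p hp
          exact H p (Or.inr hp)

-- the per-letter position test equals the per-position gap/letter test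
lemma all_positions_iff (g o : List Char) (h : g.length = o.length) :
    ((PySem.Set.ofList (g.filter PySem.Chars.isalpha)).all
        (fun c => pvPositions g c == pvPositions o c) = true)
      ↔ ∀ p ∈ g.zip o,
          (if PySem.Chars.isalpha p.1 then p.1 = p.2 else p.2 ∉ PySem.Set.ofList (g.filter PySem.Chars.isalpha)) := by
  rw [List.all_eq_true]
  have hGmem : ∀ c, c ∈ PySem.Set.ofList (g.filter PySem.Chars.isalpha) ↔ (c ∈ g ∧ PySem.Chars.isalpha c) := by
    intro c; rw [PySem.Set.mem_ofList]; simp [List.mem_filter]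
  constructor
  · intro H p hp
    have hm := List.of_mem_zip hp
    by_cases hal : PySem.Chars.isalpha p.1
    · simp only [if_pos hal]
      have hc : p.1 ∈ PySem.Set.ofList (g.filter PySem.Chars.isalpha) := (hGmem p.1).mpr ⟨hm.1, hal⟩
      have hpe : pvPositions g p.1 = pvPositions o p.1 := by
        have := H p.1 hc; simpa using this
      have hiff := (positions_from_eq_iff p.1 g o 0 h).mp (by simpa [pvPositions] using hpe) p hp
      exact (hiff.mp rfl).symm
    · simp only [if_neg hal]
      intro hc
      have hal2 : PySem.Chars.isalpha p.2 := ((hGmem p.2).mp hc).2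
      have hpe : pvPositions g p.2 = pvPositions o p.2 := by
        have := H p.2 hc; simpa using this
      have hiff := (positions_from_eq_iff p.2 g o 0 h).mp (by simpa [pvPositions] using hpe) p hp
      exact hal (hiff.mpr rfl ▸ hal2)
  · intro H c hc
    have hal_c : PySem.Chars.isalpha c := ((hGmem c).mp hc).2
    have : pvPositions g c = pvPositions o c := by
      rw [pvPositions, pvPositions]
      apply (positions_from_eq_iff c g o 0 h).mpr
      intro p hp
      have hgg := H p hp
      by_cases hal : PySem.Chars.isalpha p.1
      · rw [if_pos hal] at hgg; rw [hgg]
      · rw [if_neg hal] at hgg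
        constructor
        · intro h1; exact absurd (h1 ▸ hal_c) hal
        · intro h2; exact absurd (h2 ▸ hc) hgg
    simpa using this

-- ===== VERDICT (by name: the statement is the Claim_ definition above) =====
theorem match_with_gaps_spec : Claim_equal_match_with_gaps := by
  intro my_word other_word _
  unfold Spec_match_with_gaps
  simp only [match_with_gaps, match_with_gaps_alt, letterfold_eq_set]
  set g := PySem.Chars.replace my_word.toList [' '] [] with hg
  set o := other_word.toList with ho
  by_cases hlen : o.length = g.length
  · rw [if_pos hlen, counters_eq g o _ hlen]
    have hne : (g.length != o.length) = false := by simp [hlen]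
    rw [hne]
    by_cases hemp : g.filter PySem.Chars.isalpha = []
    · -- no alphabetic character: requirement = 0 on the A side, empty-set exit on the B side
      have hr : (g.zip o).countP (fun p => PySem.Chars.isalpha p.1) = 0 := by
        rw [List.countP_eq_zero]
        intro p hp
        have := List.of_mem_zip hp
        have := List.filter_eq_nil_iff.mp hemp p.1 this.1
        simpa using this
      simp [hemp, hr, PySem.Set.ofList]
    · have hfst : (g.zip o).countP (fun p => PySem.Chars.isalpha p.1) = g.countP PySem.Chars.isalpha := by
        rw [show (fun (p : Char × Char) => PySem.Chars.isalpha p.1) = (PySem.Chars.isalpha ∘ Prod.fst) from rfl,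
          ← List.countP_map, List.map_fst_zip (le_of_eq hlen.symm)]
      have hpos : 0 < g.countP PySem.Chars.isalpha := by
        rcases List.exists_mem_of_ne_nil _ hemp with ⟨x, hx⟩
        have := List.mem_filter.mp hx
        exact List.countP_pos_iff.mpr ⟨x, this.1, this.2⟩
      have hempB : (PySem.Set.ofList (g.filter PySem.Chars.isalpha)).isEmpty = false := by
        rcases List.exists_mem_of_ne_nil _ hemp with ⟨x, hx⟩
        have hxs : x ∈ PySem.Set.ofList (g.filter PySem.Chars.isalpha) :=
          (PySem.Set.mem_ofList _ _).mpr hx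
        simp
        exact List.ne_nil_of_mem hxs
      rw [hempB]
      have hAif : ∀ (c : Bool), (if c = true then true else false) = c := fun c => by cases c <;> simp
      simp only [hAif, Bool.false_eq_true, if_false]
      rw [Bool.eq_iff_iff, all_positions_iff g o hlen.symm]
      simp only [Bool.and_eq_true, beq_iff_eq, decide_eq_true_eq, Nat.cast_inj, Nat.cast_eq_zero,
        Int.natCast_pos, hfst]
      constructor
      · rintro ⟨⟨hA1, hA2⟩, -⟩
        have h1 := List.countP_eq_zero.mp hA1
        have h2 := (countP_and_eq_iff (g.zip o) (fun p => PySem.Chars.isalpha p.1)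
          (fun p => p.1 == p.2)).mp (by rw [hA2, hfst])
        intro p hp
        by_cases ha : PySem.Chars.isalpha p.1
        · simp only [ha, if_true]
          exact eq_of_beq (h2 p hp (by simpa using ha))
        · have ha' : PySem.Chars.isalpha p.1 = false := by simpa using ha
          have h1p := h1 p hp
          simp [ha'] at h1p ⊢
          tauto
      · intro hall
        refine ⟨⟨List.countP_eq_zero.mpr ?_, ?_⟩, hpos⟩
        · intro p hp
          have := hall p hp
          by_cases ha : PySem.Chars.isalpha p.1
          · simp [ha]
          · have ha' : PySem.Chars.isalpha p.1 = false := by simpa using ha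
            simp [ha'] at this ⊢
            tauto
        · rw [← hfst]
          rw [countP_and_eq_iff (g.zip o) (fun p => PySem.Chars.isalpha p.1) (fun p => p.1 == p.2)]
          intro p hp ha
          have := hall p hp
          simpa [ha] using this
  · rw [if_neg hlen]
    have hne : (g.length != o.length) = true := by simp; omega
    simp [hne]
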